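-- pv_equiv track=rewrite | github.com/pypi-data/pypi-mirror-335 | packages/ai-chunking/ai_chunking-0.1.9-py3-none-any.whl/ai_chunking/utils/pdf_to_markdown.py | get_chunk_page_numbers
-- ===== SOURCE A (Python) =====
-- from typing import Dict, List
--
-- def get_chunk_page_numbers(chunk_text: str, page_map: Dict[int, str]) -> List[int]:
--     """
--     Determine which page numbers a chunk belongs to
--
--     Args:
--         chunk_text: The text of the chunk
--         page_map: Dictionary mapping page numbers to page content
--
--     Returns:
--         List of page numbers this chunk belongs to
--     """
--     page_numbers = []
--
--     # For each page, check if a significant portion of the chunk is in that page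
--     for page_num, page_content in page_map.items():
--         # If the chunk text is found in the page content, add the page number
--         if chunk_text in page_content:
--             page_numbers.append(page_num)
--             continue
--
--         # Check for partial matches (at least 50 characters in sequence)
--         min_match_length = min(50, len(chunk_text) // 2)
--
--         # Check for smaller sequences from the chunk in the page
--         for i in range(len(chunk_text) - min_match_length + 1):
--             sequence = chunk_text[i:i+min_match_length]
--             if sequence in page_content:
--                 page_numbers.append(page_num)
--                 break
--
--     return page_numbers
-- ===== SOURCE B (Python) =====
-- def get_chunk_page_numbers(chunk_text, page_map):
--     """
--     Determine which page numbers a chunk belongs to.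
--
--     Builds the set of all length-L windows of the chunk once (L = min(50,
--     len(chunk_text) // 2)), then slides a length-L window over each page and
--     tests set membership, instead of running a substring search over every
--     page for every chunk window.
--     """
--     L = min(50, len(chunk_text) // 2)
--     windows = {chunk_text[i:i + L] for i in range(len(chunk_text) - L + 1)}
--     page_numbers = []
--     for page_num, page_content in page_map.items():
--         if any(page_content[j:j + L] in windows
--                for j in range(len(page_content) - L + 1)):
--             page_numbers.append(page_num)
--     return page_numbers
-- ===== Notes on version B (the rewrite author's own statement) =====
-- stated objective: faster
-- what changed: Instead of running a substring search over the page for every length-L window of the chunk, B builds the set of the chunk's length-L windows once and slides a length-L window over each page testing set membership.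
import Mathlib
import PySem

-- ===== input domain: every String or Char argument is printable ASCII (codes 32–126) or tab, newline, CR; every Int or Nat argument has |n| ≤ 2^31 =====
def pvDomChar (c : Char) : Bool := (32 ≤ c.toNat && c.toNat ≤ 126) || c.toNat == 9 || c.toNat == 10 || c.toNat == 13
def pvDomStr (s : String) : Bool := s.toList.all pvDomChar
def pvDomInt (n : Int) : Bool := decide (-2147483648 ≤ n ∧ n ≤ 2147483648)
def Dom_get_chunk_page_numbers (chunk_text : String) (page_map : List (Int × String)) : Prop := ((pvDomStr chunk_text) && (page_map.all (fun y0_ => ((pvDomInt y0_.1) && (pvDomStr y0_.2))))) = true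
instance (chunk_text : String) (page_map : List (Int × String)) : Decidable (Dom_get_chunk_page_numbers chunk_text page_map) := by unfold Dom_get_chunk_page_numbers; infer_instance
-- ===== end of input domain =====

-- B replaces A's per-page substring search over every chunk window by one set of the chunk's
-- length-L windows plus a window scan of each page; equivalence of the return values is proved.

-- ===== PORT A =====
-- per-page test of A: 'chunk_text in page_content', else the inner
-- 'for i in range(...): if sequence in page_content: append; break' — the page number is
-- appended exactly when some window matches, which the `any` expresses.
def pageMatchesA (chunk_text : String) (page_content : String) : Bool :=
  if PySem.Str.isIn chunk_text page_content then true
  else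
    let min_match_length : Int := min 50 (PySem.Int.floordiv (PySem.Str.len chunk_text) 2)
    (PySem.List.pyRange 0 (PySem.Str.len chunk_text - min_match_length + 1) 1).any
      (fun i => PySem.Str.isIn
        (PySem.Str.slice chunk_text (some i) (some (i + min_match_length))) page_content)

def get_chunk_page_numbers (chunk_text : String) (page_map : List (Int × String)) : List Int :=
  page_map.foldl
    (fun page_numbers p =>
      if pageMatchesA chunk_text p.2 then page_numbers ++ [p.1] else page_numbers) []

-- ===== PORT B =====
-- L = min(50, len(chunk_text) // 2), computed once in Source B
def Lof (chunk_text : String) : Int :=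
  min 50 (PySem.Int.floordiv (PySem.Str.len chunk_text) 2)

-- the set comprehension of Source B: all length-L windows of the chunk
def chunkWindows (chunk_text : String) : PySem.Set String :=
  PySem.Set.ofList
    ((PySem.List.pyRange 0 (PySem.Str.len chunk_text - Lof chunk_text + 1) 1).map
      (fun i => PySem.Str.slice chunk_text (some i) (some (i + Lof chunk_text))))

-- Source B's per-page 'any(page_content[j:j+L] in windows for j in range(...))'
def pageMatchesB (L : Int) (windows : PySem.Set String) (page_content : String) : Bool :=
  (PySem.List.pyRange 0 (PySem.Str.len page_content - L + 1) 1).any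
    (fun j => PySem.Set.contains windows (PySem.Str.slice page_content (some j) (some (j + L))))

def get_chunk_page_numbers_alt (chunk_text : String) (page_map : List (Int × String)) : List Int :=
  page_map.foldl
    (fun page_numbers p =>
      if pageMatchesB (Lof chunk_text) (chunkWindows chunk_text) p.2
      then page_numbers ++ [p.1] else page_numbers) []

-- ===== PRECONDITION & SPEC =====
def Spec_get_chunk_page_numbers (chunk_text : String) (page_map : List (Int × String)) (out : List Int) : Prop := out = get_chunk_page_numbers_alt chunk_text page_map
instance (chunk_text : String) (page_map : List (Int × String)) (out : List Int) : Decidable (Spec_get_chunk_page_numbers chunk_text page_map out) := by unfold Spec_get_chunk_page_numbers; infer_instance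

-- ===== CLAIM (what is proved, stated in full; the proofs are below) =====
def Claim_equal_get_chunk_page_numbers : Prop := ∀ (chunk_text : String) (page_map : List (Int × String)), Dom_get_chunk_page_numbers chunk_text page_map → Spec_get_chunk_page_numbers chunk_text page_map (get_chunk_page_numbers chunk_text page_map)

-- ===== LEMMAS AND PROOFS =====

-- a take of a drop is an infix
theorem takeDrop_isInfix (l : List Char) (j k : Nat) : (l.drop j).take k <:+: l :=
  ((l.drop j).take_prefix k).isInfix.trans (l.drop_suffix j).isInfix

-- an infix of length L is some length-L window
theorem infix_eq_window (u ps : List Char) (Ln : Nat) (hu : u.length = Ln)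
    (h : u <:+: ps) : ∃ j, j + Ln ≤ ps.length ∧ (ps.drop j).take Ln = u := by
  obtain ⟨s, t, hst⟩ := h
  refine ⟨s.length, ?_, ?_⟩
  · subst hst; simp [hu]
  · subst hst
    rw [List.append_assoc, List.drop_left, List.take_left' hu]

-- the per-page booleans of the two ports agree
theorem match_eq (c p : String) :
    pageMatchesA c p = pageMatchesB (Lof c) (chunkWindows c) p := by
  have hLof : min 50 (PySem.Int.floordiv (PySem.Str.len c) 2)
      = ((min 50 (c.toList.length / 2) : Nat) : Int) := by
    rw [PySem.Str.len_eq, PySem.Int.floordiv_eq_ediv_of_pos (by norm_num)]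
    omega
  set Ln : Nat := min 50 (c.toList.length / 2) with hLndef
  have hLn_le : Ln ≤ c.toList.length := by omega
  rw [Bool.eq_iff_iff]
  unfold pageMatchesA pageMatchesB chunkWindows Lof
  rw [hLof]
  simp only [List.any_eq_true, PySem.List.mem_pyRange_one, PySem.Set.contains_iff,
    PySem.Set.mem_ofList, List.mem_map, PySem.Str.isIn_iff_infix, PySem.Str.len_eq]
  constructor
  · intro h
    have key : ∃ i : Nat, i + Ln ≤ c.toList.length ∧ ((c.toList.drop i).take Ln) <:+: p.toList := by
      split_ifs at h with hcp
      · exact ⟨0, by omega, by simpa using ((c.toList.take_prefix Ln).isInfix.trans hcp)⟩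
      · simp only [List.any_eq_true, PySem.List.mem_pyRange_one,
          PySem.Str.isIn_iff_infix] at h
        obtain ⟨x, ⟨hx0, hxlt⟩, hinf⟩ := h
        refine ⟨x.toNat, by omega, ?_⟩
        rw [PySem.Str.toList_slice, PySem.Chars.slice_eq_listSlice,
          PySem.List.slice_toNat _ hx0 (by omega)] at hinf
        have : (x + (Ln : Int)).toNat - x.toNat = Ln := by omega
        rwa [this] at hinf
    obtain ⟨i, hiLn, hinf⟩ := key
    have hlen : ((c.toList.drop i).take Ln).length = Ln := by
      rw [List.length_take, List.length_drop]; omega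
    obtain ⟨j, hj, hjeq⟩ := infix_eq_window _ _ _ hlen hinf
    refine ⟨(j : Int), ⟨by omega, by omega⟩, (i : Int), ⟨by omega, by omega⟩, ?_⟩
    rw [← String.toList_inj]
    rw [PySem.Str.toList_slice, PySem.Str.toList_slice,
      PySem.Chars.slice_eq_listSlice, PySem.Chars.slice_eq_listSlice,
      PySem.List.slice_toNat _ (by omega) (by omega),
      PySem.List.slice_toNat _ (by omega) (by omega)]
    have h1 : ((i : Int) + (Ln : Int)).toNat - (i : Int).toNat = Ln := by omega
    have h2 : ((j : Int) + (Ln : Int)).toNat - (j : Int).toNat = Ln := by omega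
    rw [h1, h2]
    simp only [Int.toNat_natCast]
    exact hjeq.symm
  · rintro ⟨x, ⟨hx0, hxlt⟩, a, ⟨ha0, halt⟩, heq⟩
    split_ifs with hcp
    · rfl
    · simp only [List.any_eq_true, PySem.List.mem_pyRange_one,
        PySem.Str.isIn_iff_infix]
      refine ⟨a, ⟨ha0, halt⟩, ?_⟩
      have heql : (PySem.Str.slice c (some a) (some (a + (Ln : Int)))).toList
          = (PySem.Str.slice p (some x) (some (x + (Ln : Int)))).toList := by rw [heq]
      rw [PySem.Str.toList_slice, PySem.Str.toList_slice,
        PySem.Chars.slice_eq_listSlice, PySem.Chars.slice_eq_listSlice,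
        PySem.List.slice_toNat _ ha0 (by omega),
        PySem.List.slice_toNat _ hx0 (by omega)] at heql
      rw [PySem.Str.toList_slice, PySem.Chars.slice_eq_listSlice,
        PySem.List.slice_toNat _ ha0 (by omega), heql]
      exact takeDrop_isInfix _ _ _

theorem fold_eq (c : String) (pm : List (Int × String)) :
    get_chunk_page_numbers c pm = get_chunk_page_numbers_alt c pm := by
  have hf : (fun (acc : List Int) (p : Int × String) =>
        if pageMatchesA c p.2 then acc ++ [p.1] else acc)
      = (fun (acc : List Int) (p : Int × String) =>
        if pageMatchesB (Lof c) (chunkWindows c) p.2 then acc ++ [p.1] else acc) := by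
    funext acc p; rw [match_eq]
  rw [get_chunk_page_numbers, get_chunk_page_numbers_alt, hf]

-- ===== VERDICT (by name: the statement is the Claim_ definition above) =====
theorem get_chunk_page_numbers_spec : Claim_equal_get_chunk_page_numbers := by
  intro c pm _
  unfold Spec_get_chunk_page_numbers
  exact fold_eq c pm
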